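-- pv_equiv track=rewrite | github.com/dperhar/Karma_app | backend/services/domain/user_context_analysis_service.py | _categorize_topics
-- ===== SOURCE A (Python) =====
-- from typing import Any, Dict, List, Optional, Set
--
-- def _categorize_topics(keywords: List[str], texts: List[str]) -> List[str]:
--     """Categorize content into topic areas."""
--     topic_keywords = {
--         "technology": ["tech", "ai", "software", "programming", "code", "development", "app", "digital", "crypto", "blockchain"],
--         "business": ["business", "startup", "company", "market", "sales", "finance", "investment", "entrepreneur"],
--         "social": ["people", "community", "social", "friends", "family", "relationship", "network"],
--         "entertainment": ["movie", "music", "game", "sport", "entertainment", "fun", "video", "show"],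
--         "science": ["science", "research", "study", "data", "analysis", "experiment", "discovery"],
--         "politics": ["politics", "government", "policy", "election", "vote", "political"],
--         "health": ["health", "medical", "doctor", "medicine", "fitness", "exercise", "wellness"],
--         "education": ["education", "learning", "school", "university", "course", "study", "knowledge"]
--     }
--
--     user_topics = []
--
--     for topic, topic_words in topic_keywords.items():
--         # Check if user has keywords related to this topic
--         topic_score = sum(1 for keyword in keywords if keyword in topic_words)
--
--         # Also check direct mentions in texts
--         combined_text = " ".join(texts).lower()
--         mention_score = sum(combined_text.count(word) for word in topic_words)
--
--         if topic_score > 0 or mention_score > 2: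
--             user_topics.append(topic)
--
--     return user_topics
-- ===== SOURCE B (Python) =====
-- from typing import List
--
-- def _categorize_topics(keywords: List[str], texts: List[str]) -> List[str]:
--     """Categorize content into topic areas (reverse-index formulation)."""
--     topic_keywords = {
--         "technology": ["tech", "ai", "software", "programming", "code", "development", "app", "digital", "crypto", "blockchain"],
--         "business": ["business", "startup", "company", "market", "sales", "finance", "investment", "entrepreneur"],
--         "social": ["people", "community", "social", "friends", "family", "relationship", "network"],
--         "entertainment": ["movie", "music", "game", "sport", "entertainment", "fun", "video", "show"],
--         "science": ["science", "research", "study", "data", "analysis", "experiment", "discovery"],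
--         "politics": ["politics", "government", "policy", "election", "vote", "political"],
--         "health": ["health", "medical", "doctor", "medicine", "fitness", "exercise", "wellness"],
--         "education": ["education", "learning", "school", "university", "course", "study", "knowledge"]
--     }
--
--     # reverse index: word -> list of topics that contain it
--     index = {}
--     for topic, words in topic_keywords.items():
--         for w in words:
--             index.setdefault(w, []).append(topic)
--
--     topic_score = {t: 0 for t in topic_keywords}
--     mention_score = {t: 0 for t in topic_keywords}
--
--     # one pass over the keywords
--     for kw in keywords:
--         for t in index.get(kw, []):
--             topic_score[t] += 1
--
--     # combined text computed once; one substring count per DISTINCT topic-word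
--     combined_text = " ".join(texts).lower()
--     for w, ts in index.items():
--         c = combined_text.count(w)
--         for t in ts:
--             mention_score[t] += c
--
--     return [t for t in topic_keywords if topic_score[t] > 0 or mention_score[t] > 2]
-- ===== Notes on version B (the rewrite author's own statement) =====
-- stated objective: faster
-- what changed: Replaces A's per-topic rescans (and per-topic recomputation of the joined lowercased text) by a reverse word-to-topics index built once, single accumulation passes over the keywords and over the distinct topic words (one substring count per distinct word), and a final filter of the topics in table order.
import Mathlib
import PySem

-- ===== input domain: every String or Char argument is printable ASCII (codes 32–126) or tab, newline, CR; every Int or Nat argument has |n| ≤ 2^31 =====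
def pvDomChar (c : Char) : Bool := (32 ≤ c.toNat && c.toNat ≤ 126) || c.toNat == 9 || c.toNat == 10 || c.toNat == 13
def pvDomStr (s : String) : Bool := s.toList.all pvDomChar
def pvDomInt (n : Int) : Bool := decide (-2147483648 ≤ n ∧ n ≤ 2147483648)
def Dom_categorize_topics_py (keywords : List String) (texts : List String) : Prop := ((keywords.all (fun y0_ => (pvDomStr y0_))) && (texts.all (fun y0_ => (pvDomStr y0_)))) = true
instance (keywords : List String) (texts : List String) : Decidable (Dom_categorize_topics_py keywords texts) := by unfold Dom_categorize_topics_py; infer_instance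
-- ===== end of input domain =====

-- B builds a reverse word→topics index once, accumulates both scores in single passes
-- (one substring count per distinct topic word, combined text computed once) instead of
-- A's per-topic rescans; objective: alternative decomposition / constant-factor speed-up.

-- the literal topic_keywords table (module constant shared by both ports)
def pvTopicTable : List (String × List String) :=
  [("technology", ["tech", "ai", "software", "programming", "code", "development", "app", "digital", "crypto", "blockchain"]),
   ("business", ["business", "startup", "company", "market", "sales", "finance", "investment", "entrepreneur"]),
   ("social", ["people", "community", "social", "friends", "family", "relationship", "network"]),
   ("entertainment", ["movie", "music", "game", "sport", "entertainment", "fun", "video", "show"]),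
   ("science", ["science", "research", "study", "data", "analysis", "experiment", "discovery"]),
   ("politics", ["politics", "government", "policy", "election", "vote", "political"]),
   ("health", ["health", "medical", "doctor", "medicine", "fitness", "exercise", "wellness"]),
   ("education", ["education", "learning", "school", "university", "course", "study", "knowledge"])]

-- ===== PORT A =====
def categorize_topics_py (keywords : List String) (texts : List String) : List String :=
  pvTopicTable.foldl (fun user_topics p =>
    -- topic_score = sum(1 for keyword in keywords if keyword in topic_words)
    let topic_score : Int := keywords.foldl (fun acc keyword => if p.2.contains keyword then acc + 1 else acc) 0
    -- combined_text = " ".join(texts).lower()   (recomputed inside the loop, as in A)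
    let combined_text : String := PySem.Str.lower (PySem.Str.join " " texts)
    -- mention_score = sum(combined_text.count(word) for word in topic_words)
    let mention_score : Int := p.2.foldl (fun acc word => acc + (PySem.Str.count combined_text word : Int)) 0
    if topic_score > 0 ∨ mention_score > 2 then user_topics ++ [p.1] else user_topics) []

-- ===== PORT B =====
-- index.setdefault(w, []).append(topic)  ==  index[w] = index.get(w, []) + [topic]  (new keys append at the end)
def pvBuildIndex (table : List (String × List String)) : PySem.Dict String (List String) :=
  table.foldl (fun d p => p.2.foldl (fun d w => d.modify w [] (fun l => l ++ [p.1])) d) PySem.Dict.empty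

-- {t: 0 for t in topic_keywords}
def pvZeros : PySem.Dict String Int :=
  pvTopicTable.foldl (fun d p => d.insert p.1 0) PySem.Dict.empty

def categorize_topics_py_alt (keywords : List String) (texts : List String) : List String :=
  let index := pvBuildIndex pvTopicTable
  -- topic_score[t] += 1 (key always present, so modify with default 0 is exact)
  let topic_score : PySem.Dict String Int :=
    keywords.foldl (fun d kw => (index.getD kw []).foldl (fun d t => d.modify t 0 (· + 1)) d) pvZeros
  let combined_text : String := PySem.Str.lower (PySem.Str.join " " texts)
  -- mention_score[t] += combined_text.count(w), one count per distinct word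
  let mention_score : PySem.Dict String Int :=
    index.items.foldl (fun d p =>
      let c : Int := (PySem.Str.count combined_text p.1 : Int)
      p.2.foldl (fun d t => d.modify t 0 (· + c)) d) pvZeros
  -- [t for t in topic_keywords if topic_score[t] > 0 or mention_score[t] > 2]
  ((pvTopicTable.map Prod.fst).filter
    (fun t => decide (topic_score.getD t 0 > 0) || decide (mention_score.getD t 0 > 2)))

-- ===== PRECONDITION & SPEC =====
def Spec_categorize_topics_py (keywords : List String) (texts : List String) (out : List String) : Prop := out = categorize_topics_py_alt keywords texts
instance (keywords : List String) (texts : List String) (out : List String) : Decidable (Spec_categorize_topics_py keywords texts out) := by unfold Spec_categorize_topics_py; infer_instance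

-- ===== CLAIM (what is proved, stated in full; the proofs are below) =====
def Claim_equal_categorize_topics_py : Prop := ∀ (keywords : List String) (texts : List String), Dom_categorize_topics_py keywords texts → Spec_categorize_topics_py keywords texts (categorize_topics_py keywords texts)

-- ===== LEMMAS AND PROOFS =====

-- the reverse index, computed once and for all
def pvIdxItems : List (String × List String) :=
  [("tech", ["technology"]), ("ai", ["technology"]), ("software", ["technology"]), ("programming", ["technology"]), ("code", ["technology"]), ("development", ["technology"]), ("app", ["technology"]), ("digital", ["technology"]), ("crypto", ["technology"]), ("blockchain", ["technology"]), ("business", ["business"]), ("startup", ["business"]), ("company", ["business"]), ("market", ["business"]), ("sales", ["business"]), ("finance", ["business"]), ("investment", ["business"]), ("entrepreneur", ["business"]), ("people", ["social"]), ("community", ["social"]), ("social", ["social"]), ("friends", ["social"]), ("family", ["social"]), ("relationship", ["social"]), ("network", ["social"]), ("movie", ["entertainment"]), ("music", ["entertainment"]), ("game", ["entertainment"]), ("sport", ["entertainment"]), ("entertainment", ["entertainment"]), ("fun", ["entertainment"]), ("video", ["entertainment"]), ("show", ["entertainment"]), ("science", ["science"]), ("research", ["science"]), ("study", ["science", "education"]),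 ("data", ["science"]), ("analysis", ["science"]), ("experiment", ["science"]), ("discovery", ["science"]), ("politics", ["politics"]), ("government", ["politics"]), ("policy", ["politics"]), ("election", ["politics"]), ("vote", ["politics"]), ("political", ["politics"]), ("health", ["health"]), ("medical", ["health"]), ("doctor", ["health"]), ("medicine", ["health"]), ("fitness", ["health"]), ("exercise", ["health"]), ("wellness", ["health"]), ("education", ["education"]), ("learning", ["education"]), ("school", ["education"]), ("university", ["education"]), ("course", ["education"]), ("knowledge", ["education"])]

set_option maxRecDepth 100000 in
theorem pvItems_eq : (pvBuildIndex pvTopicTable).items = pvIdxItems := by decide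

-- one pass of 'for w in ws: index[w] = index.get(w, []) + [t]' appends t to the bucket of kw iff kw ∈ ws
theorem pvInnerIdx (t : String) (ws : List String) (hn : ws.Nodup)
    (d : PySem.Dict String (List String)) (kw : String) :
    (ws.foldl (fun d w => d.modify w [] (fun l => l ++ [t])) d).getD kw []
      = d.getD kw [] ++ (if ws.contains kw then [t] else []) := by
  have h1 : (ws.foldl (fun d w => d.modify w [] (fun l => l ++ [t])) d)
      = ((ws.map (fun w => (w, t))).foldl (fun d p => d.modify p.1 [] (fun l => l ++ [p.2])) d) := by
    rw [List.foldl_map]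
  rw [h1, PySem.Dict.getD_foldl_modify_append]
  have h2 : List.filter (fun p => p.1 == kw) (ws.map (fun w => (w, t)))
      = (ws.filter (fun w => w == kw)).map (fun w => (w, t)) := by
    rw [List.filter_map]; rfl
  rw [h2, List.filter_beq]
  by_cases hm : kw ∈ ws
  · have hcnt : ws.count kw = 1 := by
      have := List.count_eq_one_of_mem hn hm
      simpa using this
    simp [hcnt, hm]
  · simp [List.count_eq_zero_of_not_mem hm, hm]

-- lookup in the built reverse index = the topics (in table order) whose word lists contain kw
theorem pvBuild_getD (table : List (String × List String)) (h : ∀ p ∈ table, p.2.Nodup) :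
    ∀ (d : PySem.Dict String (List String)) (kw : String),
    (table.foldl (fun d p => p.2.foldl (fun d w => d.modify w [] (fun l => l ++ [p.1])) d) d).getD kw []
      = d.getD kw [] ++ (table.filter (fun p => p.2.contains kw)).map Prod.fst := by
  induction table with
  | nil => intro d kw; simp
  | cons p tl ih =>
    intro d kw
    have hp : p.2.Nodup := h p (by simp)
    have htl : ∀ q ∈ tl, q.2.Nodup := fun q hq => h q (by simp [hq])
    simp only [List.foldl_cons]
    rw [ih htl, pvInnerIdx p.1 p.2 hp, List.filter_cons]
    by_cases hc : kw ∈ p.2 <;> simp [hc]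

theorem pvIdx_getD (kw : String) :
    (pvBuildIndex pvTopicTable).getD kw []
      = (pvTopicTable.filter (fun p => p.2.contains kw)).map Prod.fst := by
  have := pvBuild_getD pvTopicTable (by decide) PySem.Dict.empty kw
  simpa [pvBuildIndex] using this

-- the keyword loop: final topic_score[t] = initial + Σ_kw count of t in index bucket of kw
theorem pvScoreFold (f : String → List String) (ks : List String) :
    ∀ (d : PySem.Dict String Int) (t : String),
    (ks.foldl (fun d kw => (f kw).foldl (fun d x => d.modify x 0 (· + 1)) d) d).getD t 0
      = d.getD t 0 + ((ks.map (fun kw => ((f kw).count t : Int))).sum) := by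
  induction ks with
  | nil => intro d t; simp
  | cons k tl ih =>
    intro d t
    simp only [List.foldl_cons, List.map_cons, List.sum_cons]
    rw [ih, PySem.Dict.getD_foldl_modify_add_one]
    ring

-- one inner mention pass adds c per occurrence of t in ts
theorem pvInnerAdd (c : Int) (ts : List String) :
    ∀ (d : PySem.Dict String Int) (t : String),
    (ts.foldl (fun d x => d.modify x 0 (· + c)) d).getD t 0
      = d.getD t 0 + c * (ts.count t : Int) := by
  induction ts with
  | nil => intro d t; simp
  | cons x tl ih =>
    intro d t
    simp only [List.foldl_cons]
    rw [ih, PySem.Dict.getD_modify, List.count_cons]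
    by_cases hx : t = x
    · subst hx; simp; ring
    · have : ¬ (x == t) = true := by simpa using fun h => hx (by simpa using h.symm)
      simp [hx, this]

-- the mention loop over the index items
theorem pvOuterAdd (c : String → Int) (l : List (String × List String)) :
    ∀ (d : PySem.Dict String Int) (t : String),
    (l.foldl (fun d p => p.2.foldl (fun d x => d.modify x 0 (· + c p.1)) d) d).getD t 0
      = d.getD t 0 + (l.map (fun p => c p.1 * (p.2.count t : Int))).sum := by
  induction l with
  | nil => intro d t; simp
  | cons p tl ih =>
    intro d t
    simp only [List.foldl_cons, List.map_cons, List.sum_cons]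
    rw [ih, pvInnerAdd]
    ring

-- pvZeros maps every string to 0 under default 0 (all stored values are 0)
theorem pvZeros_getD (t : String) : pvZeros.getD t 0 = 0 := by
  simp only [pvZeros, pvTopicTable, List.foldl_cons, List.foldl_nil, PySem.Dict.getD_insert,
    PySem.Dict.getD_empty]
  split_ifs <;> rfl

-- per-topic: counting t in the bucket list of kw is the membership test of A's inner generator
theorem pvCnt (t : String) (ws : List String) (hmem : (t, ws) ∈ pvTopicTable) (kw : String) :
    List.count t ((pvTopicTable.filter (fun p => p.2.contains kw)).map Prod.fst)
      = if ws.contains kw then 1 else 0 := by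
  fin_cases hmem <;>
    simp [pvTopicTable, List.count_eq_countP, List.countP_map, List.countP_filter,
      List.countP_cons, Function.comp]

theorem pvScoreB_val (t : String) (ws : List String)
    (h : ∀ kw : String, List.count t ((pvTopicTable.filter (fun p => p.2.contains kw)).map Prod.fst)
        = if ws.contains kw then 1 else 0) (ks : List String) :
    (ks.map (fun kw => (List.count t ((pvTopicTable.filter (fun p => p.2.contains kw)).map Prod.fst) : Int))).sum
      = (ks.countP (fun k => ws.contains k) : Int) := by
  simp only [h]
  push_cast
  rw [PySem.List.sum_map_ite_one_zero]

-- per-topic: summing c(w)·(bucket count of t) over the index items is A's sum of c over topic words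
theorem pvMention (t : String) (ws : List String) (hmem : (t, ws) ∈ pvTopicTable) (c : String → Int) :
    (pvIdxItems.map (fun p => c p.1 * (p.2.count t : Int))).sum = (ws.map c).sum := by
  fin_cases hmem <;> simp [pvIdxItems] <;> ring

-- final assembly
theorem pv_main (keywords texts : List String) :
    categorize_topics_py keywords texts = categorize_topics_py_alt keywords texts := by
  unfold categorize_topics_py categorize_topics_py_alt
  rw [List.filter_map]
  have hA := PySem.List.foldl_append_if
      (fun p : String × List String =>
        decide (keywords.foldl (fun acc keyword => if p.2.contains keyword then acc + 1 else acc) (0:Int) > 0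
          ∨ p.2.foldl (fun acc word => acc + (PySem.Str.count (PySem.Str.lower (PySem.Str.join " " texts)) word : Int)) 0 > 2))
      Prod.fst pvTopicTable []
  simp only [decide_eq_true_eq] at hA
  rw [hA]
  simp only [List.nil_append]
  apply congrArg
  apply List.filter_congr
  intro p hp
  have hmem : (p.1, p.2) ∈ pvTopicTable := by simpa using hp
  simp only [Function.comp]
  rw [PySem.List.foldl_if_add_one, PySem.List.foldl_add, pvScoreFold,
      pvOuterAdd (fun w => (PySem.Str.count (PySem.Str.lower (PySem.Str.join " " texts)) w : Int)),
      pvItems_eq]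
  simp only [pvIdx_getD, pvZeros_getD, zero_add]
  rw [pvScoreB_val p.1 p.2 (pvCnt p.1 p.2 hmem),
      pvMention p.1 p.2 hmem (fun w => (PySem.Str.count (PySem.Str.lower (PySem.Str.join " " texts)) w : Int))]
  simp [Bool.decide_or]

-- ===== VERDICT (by name: the statement is the Claim_ definition above) =====
theorem categorize_topics_py_spec : Claim_equal_categorize_topics_py := by
  intro keywords texts _
  unfold Spec_categorize_topics_py
  exact pv_main keywords texts
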